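-- pv_equiv track=rewrite | github.com/SwarajPawar/rddlsim_interface | data/metaData.py | get_feature_labels
-- ===== SOURCE A (Python) =====
-- def get_feature_labels(dataset_name):
--
--
--     if dataset_name == 'Elevators':
--         features = list()
--         for i in range(6):
--             features += [f'EF{i}', f'PW{i}', f'PU{i}', f'ED{i}', f'EC{i}',  f'A{i}']
--         features += [f'EF6', f'PW6', f'PU6', f'ED6', f'EC', 'RW']
--         return features
--
--     if dataset_name == 'Navigation':
--         features = list()
--         for i in range(5):
--             features += [f'R1{i}', f'R2{i}', f'R3{i}', f'R4{i}',  f'R5{i}', f'R6{i}', f'A{i}']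
--         features += [f'R15', f'R25', f'R35', f'R45', f'R55', f'R65', 'RW']
--         return features
--
--     if dataset_name == 'GameOfLife':
--         features = list()
--         for i in range(3):
--             features += [f'C1{i}', f'C2{i}', f'C3{i}', f'C4{i}',  f'C5{i}', f'C6{i}', f'C7{i}',  f'C8{i}', f'C9{i}', f'A{i}']
--         features += [f'C13', f'C23', f'C33', f'C43', f'C53', f'C63', f'C73', f'C83', f'C93', 'RW']
--         return features
--
--     if dataset_name == 'SysAdmin':
--         features = list()
--         for i in range(3):
--             features += [f'R1{i}', f'R2{i}', f'R3{i}', f'R4{i}', f'R5{i}', f'R6{i}', f'R7{i}', f'R8{i}', f'R9{i}', f'R10{i}', f'A{i}']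
--         features += [f'R13', f'R23', f'R33', f'R43', f'R53', f'R63', f'R73', f'R83', f'R93', f'R103', 'RW']
--         return features
--
--     if dataset_name == 'CrossingTraffic':
--         features = list()
--         for i in range(5):
--             features += [f'R1{i}', f'R2{i}', f'R3{i}', f'R4{i}', f'R5{i}', f'R6{i}',
--                          f'R7{i}', f'R8{i}', f'R9{i}', f'O2{i}', f'O5{i}', f'O8{i}', f'A{i}']
--         features += [f'R15', f'R25', f'R35', f'R45', f'R55', f'R65',
--                      f'R75', f'R85', f'R95', f'O25', f'O55', f'O85', 'RW']
--         return features
--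
--     if dataset_name == 'SkillTeaching':
--         features = list()
--         for i in range(5):
--             features += [f'HD0{i}', f'HD1{i}', f'HR0{i}', f'HR1{i}', f'PM0{i}', f'PM1{i}', f'UT0{i}', f'UT1{i}',
--                                 f'AR0{i}', f'AR1{i}', f'PH0{i}', f'PH1{i}', f'A{i}']
--         features += [f'HD05', f'HD15', f'HR05', f'HR15', f'PM05', f'PM15', f'UT05', f'UT15',
--                                 f'AR05', f'AR15', f'PH05', f'PH15', 'RW']
--         return features
-- ===== SOURCE B (Python) =====
-- # All six label lists are fixed constants; B stores them fully expanded and just looks them up.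
-- _FEATURES = {
--     'Elevators': ["EF0", "PW0", "PU0", "ED0", "EC0", "A0", "EF1", "PW1", "PU1", "ED1", "EC1", "A1", "EF2", "PW2", "PU2", "ED2", "EC2", "A2", "EF3", "PW3", "PU3", "ED3", "EC3", "A3", "EF4", "PW4", "PU4", "ED4", "EC4", "A4", "EF5", "PW5", "PU5", "ED5", "EC5", "A5", "EF6", "PW6", "PU6", "ED6", "EC", "RW"],
--     'Navigation': ["R10", "R20", "R30", "R40", "R50", "R60", "A0", "R11", "R21", "R31", "R41", "R51", "R61", "A1", "R12", "R22", "R32", "R42", "R52", "R62", "A2", "R13", "R23", "R33", "R43", "R53", "R63", "A3", "R14", "R24", "R34", "R44", "R54", "R64", "A4", "R15", "R25", "R35", "R45", "R55", "R65", "RW"],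
--     'GameOfLife': ["C10", "C20", "C30", "C40", "C50", "C60", "C70", "C80", "C90", "A0", "C11", "C21", "C31", "C41", "C51", "C61", "C71", "C81", "C91", "A1", "C12", "C22", "C32", "C42", "C52", "C62", "C72", "C82", "C92", "A2", "C13", "C23", "C33", "C43", "C53", "C63", "C73", "C83", "C93", "RW"],
--     'SysAdmin': ["R10", "R20", "R30", "R40", "R50", "R60", "R70", "R80", "R90", "R100", "A0", "R11", "R21", "R31", "R41", "R51", "R61", "R71", "R81", "R91", "R101", "A1", "R12", "R22", "R32", "R42", "R52", "R62", "R72", "R82", "R92", "R102", "A2", "R13", "R23", "R33", "R43", "R53", "R63", "R73", "R83", "R93", "R103", "RW"],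
--     'CrossingTraffic': ["R10", "R20", "R30", "R40", "R50", "R60", "R70", "R80", "R90", "O20", "O50", "O80", "A0", "R11", "R21", "R31", "R41", "R51", "R61", "R71", "R81", "R91", "O21", "O51", "O81", "A1", "R12", "R22", "R32", "R42", "R52", "R62", "R72", "R82", "R92", "O22", "O52", "O82", "A2", "R13", "R23", "R33", "R43", "R53", "R63", "R73", "R83", "R93", "O23", "O53", "O83", "A3", "R14", "R24", "R34", "R44", "R54", "R64", "R74", "R84", "R94", "O24", "O54", "O84", "A4", "R15", "R25", "R35", "R45", "R55", "R65", "R75", "R85", "R95", "O25", "O55", "O85", "RW"],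
--     'SkillTeaching': ["HD00", "HD10", "HR00", "HR10", "PM00", "PM10", "UT00", "UT10", "AR00", "AR10", "PH00", "PH10", "A0", "HD01", "HD11", "HR01", "HR11", "PM01", "PM11", "UT01", "UT11", "AR01", "AR11", "PH01", "PH11", "A1", "HD02", "HD12", "HR02", "HR12", "PM02", "PM12", "UT02", "UT12", "AR02", "AR12", "PH02", "PH12", "A2", "HD03", "HD13", "HR03", "HR13", "PM03", "PM13", "UT03", "UT13", "AR03", "AR13", "PH03", "PH13", "A3", "HD04", "HD14", "HR04", "HR14", "PM04", "PM14", "UT04", "UT14", "AR04", "AR14", "PH04", "PH14", "A4", "HD05", "HD15", "HR05", "HR15", "PM05", "PM15", "UT05", "UT15", "AR05", "AR15", "PH05", "PH15", "RW"],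
-- }
--
--
-- def get_feature_labels(dataset_name):
--     return _FEATURES.get(dataset_name)
-- ===== Notes on version B (the rewrite author's own statement) =====
-- stated objective: simpler
-- what changed: B eliminates all computation: instead of A's per-dataset loops that build each label by string formatting, B stores the six complete label lists as fully-expanded literal constants in a dict and returns a single dict.get lookup (None for unknown names).
import Mathlib
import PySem

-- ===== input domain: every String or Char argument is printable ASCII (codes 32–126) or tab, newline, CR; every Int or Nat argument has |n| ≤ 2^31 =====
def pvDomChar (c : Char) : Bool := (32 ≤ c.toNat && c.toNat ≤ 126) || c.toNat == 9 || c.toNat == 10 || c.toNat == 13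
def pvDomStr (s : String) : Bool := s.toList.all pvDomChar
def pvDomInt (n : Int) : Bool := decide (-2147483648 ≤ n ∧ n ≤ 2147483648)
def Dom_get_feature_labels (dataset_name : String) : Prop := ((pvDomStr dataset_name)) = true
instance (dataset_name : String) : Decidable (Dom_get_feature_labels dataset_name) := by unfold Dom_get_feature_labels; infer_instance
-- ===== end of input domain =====

-- B replaces A's per-dataset building loops by a dict of fully-expanded literal label lists and a single lookup; objective: simpler.

-- ===== PORT A =====
def get_feature_labels (dataset_name : String) : Option (List String) :=
  if dataset_name = "Elevators" then
    let features : List String := []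
    let features := (PySem.List.pyRange 0 6 1).foldl (fun fs i =>
      fs ++ ["EF" ++ PySem.Int.toStr i, "PW" ++ PySem.Int.toStr i, "PU" ++ PySem.Int.toStr i,
             "ED" ++ PySem.Int.toStr i, "EC" ++ PySem.Int.toStr i, "A" ++ PySem.Int.toStr i]) features
    let features := features ++ ["EF6", "PW6", "PU6", "ED6", "EC", "RW"]
    some features
  else if dataset_name = "Navigation" then
    let features : List String := []
    let features := (PySem.List.pyRange 0 5 1).foldl (fun fs i =>
      fs ++ ["R1" ++ PySem.Int.toStr i, "R2" ++ PySem.Int.toStr i, "R3" ++ PySem.Int.toStr i,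
             "R4" ++ PySem.Int.toStr i, "R5" ++ PySem.Int.toStr i, "R6" ++ PySem.Int.toStr i,
             "A" ++ PySem.Int.toStr i]) features
    let features := features ++ ["R15", "R25", "R35", "R45", "R55", "R65", "RW"]
    some features
  else if dataset_name = "GameOfLife" then
    let features : List String := []
    let features := (PySem.List.pyRange 0 3 1).foldl (fun fs i =>
      fs ++ ["C1" ++ PySem.Int.toStr i, "C2" ++ PySem.Int.toStr i, "C3" ++ PySem.Int.toStr i,
             "C4" ++ PySem.Int.toStr i, "C5" ++ PySem.Int.toStr i, "C6" ++ PySem.Int.toStr i,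
             "C7" ++ PySem.Int.toStr i, "C8" ++ PySem.Int.toStr i, "C9" ++ PySem.Int.toStr i,
             "A" ++ PySem.Int.toStr i]) features
    let features := features ++ ["C13", "C23", "C33", "C43", "C53", "C63", "C73", "C83", "C93", "RW"]
    some features
  else if dataset_name = "SysAdmin" then
    let features : List String := []
    let features := (PySem.List.pyRange 0 3 1).foldl (fun fs i =>
      fs ++ ["R1" ++ PySem.Int.toStr i, "R2" ++ PySem.Int.toStr i, "R3" ++ PySem.Int.toStr i,
             "R4" ++ PySem.Int.toStr i, "R5" ++ PySem.Int.toStr i, "R6" ++ PySem.Int.toStr i,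
             "R7" ++ PySem.Int.toStr i, "R8" ++ PySem.Int.toStr i, "R9" ++ PySem.Int.toStr i,
             "R10" ++ PySem.Int.toStr i, "A" ++ PySem.Int.toStr i]) features
    let features := features ++ ["R13", "R23", "R33", "R43", "R53", "R63", "R73", "R83", "R93", "R103", "RW"]
    some features
  else if dataset_name = "CrossingTraffic" then
    let features : List String := []
    let features := (PySem.List.pyRange 0 5 1).foldl (fun fs i =>
      fs ++ ["R1" ++ PySem.Int.toStr i, "R2" ++ PySem.Int.toStr i, "R3" ++ PySem.Int.toStr i,
             "R4" ++ PySem.Int.toStr i, "R5" ++ PySem.Int.toStr i, "R6" ++ PySem.Int.toStr i,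
             "R7" ++ PySem.Int.toStr i, "R8" ++ PySem.Int.toStr i, "R9" ++ PySem.Int.toStr i,
             "O2" ++ PySem.Int.toStr i, "O5" ++ PySem.Int.toStr i, "O8" ++ PySem.Int.toStr i,
             "A" ++ PySem.Int.toStr i]) features
    let features := features ++ ["R15", "R25", "R35", "R45", "R55", "R65",
                                 "R75", "R85", "R95", "O25", "O55", "O85", "RW"]
    some features
  else if dataset_name = "SkillTeaching" then
    let features : List String := []
    let features := (PySem.List.pyRange 0 5 1).foldl (fun fs i =>
      fs ++ ["HD0" ++ PySem.Int.toStr i, "HD1" ++ PySem.Int.toStr i, "HR0" ++ PySem.Int.toStr i,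
             "HR1" ++ PySem.Int.toStr i, "PM0" ++ PySem.Int.toStr i, "PM1" ++ PySem.Int.toStr i,
             "UT0" ++ PySem.Int.toStr i, "UT1" ++ PySem.Int.toStr i, "AR0" ++ PySem.Int.toStr i,
             "AR1" ++ PySem.Int.toStr i, "PH0" ++ PySem.Int.toStr i, "PH1" ++ PySem.Int.toStr i,
             "A" ++ PySem.Int.toStr i]) features
    let features := features ++ ["HD05", "HD15", "HR05", "HR15", "PM05", "PM15", "UT05", "UT15",
                                 "AR05", "AR15", "PH05", "PH15", "RW"]
    some features
  else
    none

-- ===== PORT B =====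
-- _FEATURES: each dataset's complete label list stored fully expanded
def pvFeatures : PySem.Dict String (List String) :=
  PySem.Dict.ofList
    [("Elevators", ["EF0", "PW0", "PU0", "ED0", "EC0", "A0", "EF1", "PW1", "PU1", "ED1", "EC1", "A1", "EF2", "PW2", "PU2", "ED2", "EC2", "A2", "EF3", "PW3", "PU3", "ED3", "EC3", "A3", "EF4", "PW4", "PU4", "ED4", "EC4", "A4", "EF5", "PW5", "PU5", "ED5", "EC5", "A5", "EF6", "PW6", "PU6", "ED6", "EC", "RW"]),
     ("Navigation", ["R10", "R20", "R30", "R40", "R50", "R60", "A0", "R11", "R21", "R31", "R41", "R51", "R61", "A1", "R12", "R22", "R32", "R42", "R52", "R62", "A2", "R13", "R23", "R33", "R43", "R53", "R63", "A3", "R14", "R24", "R34", "R44", "R54", "R64", "A4", "R15", "R25", "R35", "R45", "R55", "R65", "RW"]),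
     ("GameOfLife", ["C10", "C20", "C30", "C40", "C50", "C60", "C70", "C80", "C90", "A0", "C11", "C21", "C31", "C41", "C51", "C61", "C71", "C81", "C91", "A1", "C12", "C22", "C32", "C42", "C52", "C62", "C72", "C82", "C92", "A2", "C13", "C23", "C33", "C43", "C53", "C63", "C73", "C83", "C93", "RW"]),
     ("SysAdmin", ["R10", "R20", "R30", "R40", "R50", "R60", "R70", "R80", "R90", "R100", "A0", "R11", "R21", "R31", "R41", "R51", "R61", "R71", "R81", "R91", "R101", "A1", "R12", "R22", "R32", "R42", "R52", "R62", "R72", "R82", "R92", "R102", "A2", "R13", "R23", "R33", "R43", "R53", "R63", "R73", "R83", "R93", "R103", "RW"]),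
     ("CrossingTraffic", ["R10", "R20", "R30", "R40", "R50", "R60", "R70", "R80", "R90", "O20", "O50", "O80", "A0", "R11", "R21", "R31", "R41", "R51", "R61", "R71", "R81", "R91", "O21", "O51", "O81", "A1", "R12", "R22", "R32", "R42", "R52", "R62", "R72", "R82", "R92", "O22", "O52", "O82", "A2", "R13", "R23", "R33", "R43", "R53", "R63", "R73", "R83", "R93", "O23", "O53", "O83", "A3", "R14", "R24", "R34", "R44", "R54", "R64", "R74", "R84", "R94", "O24", "O54", "O84", "A4", "R15", "R25", "R35", "R45", "R55", "R65", "R75", "R85", "R95", "O25", "O55", "O85", "RW"]),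
     ("SkillTeaching", ["HD00", "HD10", "HR00", "HR10", "PM00", "PM10", "UT00", "UT10", "AR00", "AR10", "PH00", "PH10", "A0", "HD01", "HD11", "HR01", "HR11", "PM01", "PM11", "UT01", "UT11", "AR01", "AR11", "PH01", "PH11", "A1", "HD02", "HD12", "HR02", "HR12", "PM02", "PM12", "UT02", "UT12", "AR02", "AR12", "PH02", "PH12", "A2", "HD03", "HD13", "HR03", "HR13", "PM03", "PM13", "UT03", "UT13", "AR03", "AR13", "PH03", "PH13", "A3", "HD04", "HD14", "HR04", "HR14", "PM04", "PM14", "UT04", "UT14", "AR04", "AR14", "PH04", "PH14", "A4", "HD05", "HD15", "HR05", "HR15", "PM05", "PM15", "UT05", "UT15", "AR05", "AR15", "PH05", "PH15", "RW"])]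

def get_feature_labels_alt (dataset_name : String) : Option (List String) :=
  pvFeatures.get? dataset_name

-- ===== PRECONDITION & SPEC =====
def Spec_get_feature_labels (dataset_name : String) (out : Option (List String)) : Prop := out = get_feature_labels_alt dataset_name
instance (dataset_name : String) (out : Option (List String)) : Decidable (Spec_get_feature_labels dataset_name out) := by unfold Spec_get_feature_labels; infer_instance

-- ===== CLAIM =====
def Claim_equal_get_feature_labels : Prop := ∀ (dataset_name : String), Dom_get_feature_labels dataset_name → Spec_get_feature_labels dataset_name (get_feature_labels dataset_name)

-- ===== LEMMAS AND PROOFS =====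

-- pvFeatures as a literal association list (six rows, insertion order)
theorem pvFeatures_mk : pvFeatures = PySem.Dict.mk
    [("Elevators", ["EF0", "PW0", "PU0", "ED0", "EC0", "A0", "EF1", "PW1", "PU1", "ED1", "EC1", "A1", "EF2", "PW2", "PU2", "ED2", "EC2", "A2", "EF3", "PW3", "PU3", "ED3", "EC3", "A3", "EF4", "PW4", "PU4", "ED4", "EC4", "A4", "EF5", "PW5", "PU5", "ED5", "EC5", "A5", "EF6", "PW6", "PU6", "ED6", "EC", "RW"]),
     ("Navigation", ["R10", "R20", "R30", "R40", "R50", "R60", "A0", "R11", "R21", "R31", "R41", "R51", "R61", "A1", "R12", "R22", "R32", "R42", "R52", "R62", "A2", "R13", "R23", "R33", "R43", "R53", "R63", "A3", "R14", "R24", "R34", "R44", "R54", "R64", "A4", "R15", "R25", "R35", "R45", "R55", "R65", "RW"]),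
     ("GameOfLife", ["C10", "C20", "C30", "C40", "C50", "C60", "C70", "C80", "C90", "A0", "C11", "C21", "C31", "C41", "C51", "C61", "C71", "C81", "C91", "A1", "C12", "C22", "C32", "C42", "C52", "C62", "C72", "C82", "C92", "A2", "C13", "C23", "C33", "C43", "C53", "C63", "C73", "C83", "C93", "RW"]),
     ("SysAdmin", ["R10", "R20", "R30", "R40", "R50", "R60", "R70", "R80", "R90", "R100", "A0", "R11", "R21", "R31", "R41", "R51", "R61", "R71", "R81", "R91", "R101", "A1", "R12", "R22", "R32", "R42", "R52", "R62", "R72", "R82", "R92", "R102", "A2", "R13", "R23", "R33", "R43", "R53", "R63", "R73", "R83", "R93", "R103", "RW"]),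
     ("CrossingTraffic", ["R10", "R20", "R30", "R40", "R50", "R60", "R70", "R80", "R90", "O20", "O50", "O80", "A0", "R11", "R21", "R31", "R41", "R51", "R61", "R71", "R81", "R91", "O21", "O51", "O81", "A1", "R12", "R22", "R32", "R42", "R52", "R62", "R72", "R82", "R92", "O22", "O52", "O82", "A2", "R13", "R23", "R33", "R43", "R53", "R63", "R73", "R83", "R93", "O23", "O53", "O83", "A3", "R14", "R24", "R34", "R44", "R54", "R64", "R74", "R84", "R94", "O24", "O54", "O84", "A4", "R15", "R25", "R35", "R45", "R55", "R65", "R75", "R85", "R95", "O25", "O55", "O85", "RW"]),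
     ("SkillTeaching", ["HD00", "HD10", "HR00", "HR10", "PM00", "PM10", "UT00", "UT10", "AR00", "AR10", "PH00", "PH10", "A0", "HD01", "HD11", "HR01", "HR11", "PM01", "PM11", "UT01", "UT11", "AR01", "AR11", "PH01", "PH11", "A1", "HD02", "HD12", "HR02", "HR12", "PM02", "PM12", "UT02", "UT12", "AR02", "AR12", "PH02", "PH12", "A2", "HD03", "HD13", "HR03", "HR13", "PM03", "PM13", "UT03", "UT13", "AR03", "AR13", "PH03", "PH13", "A3", "HD04", "HD14", "HR04", "HR14", "PM04", "PM14", "UT04", "UT14", "AR04", "AR14", "PH04", "PH14", "A4", "HD05", "HD15", "HR05", "HR15", "PM05", "PM15", "UT05", "UT15", "AR05", "AR15", "PH05", "PH15", "RW"])] := by rfl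

-- ===== VERDICT =====
theorem get_feature_labels_spec : Claim_equal_get_feature_labels := by
  intro s _
  unfold Spec_get_feature_labels
  by_cases h1 : s = "Elevators"
  · subst h1; decide
  by_cases h2 : s = "Navigation"
  · subst h2; decide
  by_cases h3 : s = "GameOfLife"
  · subst h3; decide
  by_cases h4 : s = "SysAdmin"
  · subst h4; decide
  by_cases h5 : s = "CrossingTraffic"
  · subst h5; decide
  by_cases h6 : s = "SkillTeaching"
  · subst h6; decide
  have hnone : pvFeatures.get? s = none := by
    rw [pvFeatures_mk]
    simp [PySem.Dict.get?, beq_iff_eq]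
    exact ⟨Ne.symm h1, Ne.symm h2, Ne.symm h3, Ne.symm h4, Ne.symm h5, Ne.symm h6⟩
  simp [get_feature_labels, get_feature_labels_alt, hnone, h1, h2, h3, h4, h5, h6]
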